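-- pv_equiv track=rewrite | github.com/mingo2/Calcolo-automatico-per-la-meccanica-dei-solidi | BiforcazioneFlessibile.py | semplificavincoli
-- ===== SOURCE A (Python) =====
-- def semplificavincoli(V,Pr):#'ⓝ','ⓣ','Ⓝ','Ⓣ','ⓐ','ⓔ'
--     S   = [[], [], [], []]
--     for i in range(len(V)):
--         for j in range(len(V[i])):
--             if i in [0,1,3,4,5]:
--                 S[0].append(V[i][j]  +'ⓝ')
--             if i in [2,4,5]:
--                 S[2].append(V[i][j]  +'ⓐ')
--             if i in [3,5]:
--                 S[1].append(V[i][j]  +'ⓣ')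
--             if i in [6]:
--                 S[3].append(V[i][j]  +'ⓔ')
--     return S
-- ===== SOURCE B (Python) =====
-- def _cat(idxs, suf, V):
--     return [v + suf for i in idxs if i < len(V) for v in V[i]]
--
-- def semplificavincoli(V, Pr):
--     return [_cat((0, 1, 3, 4, 5), 'ⓝ', V),
--             _cat((3, 5), 'ⓣ', V),
--             _cat((2, 4, 5), 'ⓐ', V),
--             _cat((6,), 'ⓔ', V)]
-- ===== Notes on version B (the rewrite author's own statement) =====
-- stated objective: simpler
-- what changed: Instead of one categorizing pass that walks every row and element while switching on the row index into a shared 4-list state, B builds each of the four output lists independently by a comprehension over exactly the row indices that feed it (guarded by i < len(V)), so there is no shared state and no per-element index dispatch.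
import Mathlib
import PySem

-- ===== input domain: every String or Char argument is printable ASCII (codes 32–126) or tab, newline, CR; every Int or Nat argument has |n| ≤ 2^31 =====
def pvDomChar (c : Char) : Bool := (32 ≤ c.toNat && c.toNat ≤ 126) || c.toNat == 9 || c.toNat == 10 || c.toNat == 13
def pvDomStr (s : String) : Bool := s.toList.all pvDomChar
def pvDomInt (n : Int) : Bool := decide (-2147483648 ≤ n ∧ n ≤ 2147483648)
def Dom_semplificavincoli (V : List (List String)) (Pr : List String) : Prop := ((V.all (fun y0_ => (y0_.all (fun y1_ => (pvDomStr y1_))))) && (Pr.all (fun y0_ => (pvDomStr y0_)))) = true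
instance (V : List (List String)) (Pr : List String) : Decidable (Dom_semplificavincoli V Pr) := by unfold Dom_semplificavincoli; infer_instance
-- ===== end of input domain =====

-- B replaces A's single categorizing pass (shared 4-list state, per-element index dispatch)
-- by four independent comprehensions, one per output list, over exactly the rows that feed it (objective: simpler).

-- ===== PORT A =====
def semplificavincoli (V : List (List String)) (Pr : List String) : List (List String) :=
  let S : List String × List String × List String × List String := ([], [], [], [])
  let S :=
    (PySem.List.pyRange 0 (V.length : Int) 1).foldl
      (fun (S : List String × List String × List String × List String) i =>
        let row := PySem.List.pyGetD V i []
        (PySem.List.pyRange 0 (row.length : Int) 1).foldl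
          (fun (S : List String × List String × List String × List String) j =>
            let x := PySem.List.pyGetD row j ""
            ((if i ∈ ([0, 1, 3, 4, 5] : List Int) then S.1 ++ [x ++ "ⓝ"] else S.1),
             (if i ∈ ([3, 5] : List Int) then S.2.1 ++ [x ++ "ⓣ"] else S.2.1),
             (if i ∈ ([2, 4, 5] : List Int) then S.2.2.1 ++ [x ++ "ⓐ"] else S.2.2.1),
             (if i ∈ ([6] : List Int) then S.2.2.2 ++ [x ++ "ⓔ"] else S.2.2.2)))
          S)
      S
  [S.1, S.2.1, S.2.2.1, S.2.2.2]

-- ===== PORT B =====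
-- B-side helper: the comprehension [v + suf for i in idxs if i < len(V) for v in V[i]]
def pvCat (idxs : List Int) (suf : String) (V : List (List String)) : List String :=
  idxs.flatMap (fun i => if i < (V.length : Int) then (PySem.List.pyGetD V i []).map (· ++ suf) else [])

def semplificavincoli_alt (V : List (List String)) (Pr : List String) : List (List String) :=
  [pvCat [0, 1, 3, 4, 5] "ⓝ" V,
   pvCat [3, 5] "ⓣ" V,
   pvCat [2, 4, 5] "ⓐ" V,
   pvCat [6] "ⓔ" V]

-- ===== PRECONDITION & SPEC =====
def Spec_semplificavincoli (V : List (List String)) (Pr : List String) (out : List (List String)) : Prop := out = semplificavincoli_alt V Pr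
instance (V : List (List String)) (Pr : List String) (out : List (List String)) : Decidable (Spec_semplificavincoli V Pr out) := by unfold Spec_semplificavincoli; infer_instance

-- ===== CLAIM (what is proved, stated in full; the proofs are below) =====
def Claim_equal_semplificavincoli : Prop := ∀ (V : List (List String)) (Pr : List String), Dom_semplificavincoli V Pr → Spec_semplificavincoli V Pr (semplificavincoli V Pr)

-- ===== LEMMAS AND PROOFS =====

-- the per-row contribution of row i to category (I, suf)
def pvG (V : List (List String)) (I : List Int) (suf : String) (i : Int) : List String :=
  if i ∈ I then (PySem.List.pyGetD V i []).map (· ++ suf) else []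

-- A's inner loop over a row appends the row's contribution to each of the four lists
lemma pv_inner (row : List String) (i : Int) (a b c d : List String) :
    (PySem.List.pyRange 0 (row.length : Int) 1).foldl
      (fun (S : List String × List String × List String × List String) j =>
        let x := PySem.List.pyGetD row j ""
        ((if i ∈ ([0, 1, 3, 4, 5] : List Int) then S.1 ++ [x ++ "ⓝ"] else S.1),
         (if i ∈ ([3, 5] : List Int) then S.2.1 ++ [x ++ "ⓣ"] else S.2.1),
         (if i ∈ ([2, 4, 5] : List Int) then S.2.2.1 ++ [x ++ "ⓐ"] else S.2.2.1),
         (if i ∈ ([6] : List Int) then S.2.2.2 ++ [x ++ "ⓔ"] else S.2.2.2)))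
      (a, b, c, d)
    = (a ++ (if i ∈ ([0, 1, 3, 4, 5] : List Int) then row.map (· ++ "ⓝ") else []),
       b ++ (if i ∈ ([3, 5] : List Int) then row.map (· ++ "ⓣ") else []),
       c ++ (if i ∈ ([2, 4, 5] : List Int) then row.map (· ++ "ⓐ") else []),
       d ++ (if i ∈ ([6] : List Int) then row.map (· ++ "ⓔ") else [])) := by
  rw [PySem.List.foldl_pyRange_zero_pyGetD' row ""
      (fun (S : List String × List String × List String × List String) x =>
        ((if i ∈ ([0, 1, 3, 4, 5] : List Int) then S.1 ++ [x ++ "ⓝ"] else S.1),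
         (if i ∈ ([3, 5] : List Int) then S.2.1 ++ [x ++ "ⓣ"] else S.2.1),
         (if i ∈ ([2, 4, 5] : List Int) then S.2.2.1 ++ [x ++ "ⓐ"] else S.2.2.1),
         (if i ∈ ([6] : List Int) then S.2.2.2 ++ [x ++ "ⓔ"] else S.2.2.2))) (a, b, c, d)]
  induction row generalizing a b c d with
  | nil => simp
  | cons y row ih =>
    simp only [List.foldl_cons]
    rw [ih]
    by_cases h0 : i ∈ ([0, 1, 3, 4, 5] : List Int) <;>
    by_cases h1 : i ∈ ([3, 5] : List Int) <;>
    by_cases h2 : i ∈ ([2, 4, 5] : List Int) <;>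
    by_cases h3 : i ∈ ([6] : List Int) <;>
      simp [h0, h1, h2, h3, List.append_assoc]

-- A's outer loop over any index list L appends the concatenated contributions
lemma pv_outer (V : List (List String)) (L : List Int) (a b c d : List String) :
    L.foldl
      (fun (S : List String × List String × List String × List String) i =>
        let row := PySem.List.pyGetD V i []
        (PySem.List.pyRange 0 (row.length : Int) 1).foldl
          (fun (S : List String × List String × List String × List String) j =>
            let x := PySem.List.pyGetD row j ""
            ((if i ∈ ([0, 1, 3, 4, 5] : List Int) then S.1 ++ [x ++ "ⓝ"] else S.1),
             (if i ∈ ([3, 5] : List Int) then S.2.1 ++ [x ++ "ⓣ"] else S.2.1),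
             (if i ∈ ([2, 4, 5] : List Int) then S.2.2.1 ++ [x ++ "ⓐ"] else S.2.2.1),
             (if i ∈ ([6] : List Int) then S.2.2.2 ++ [x ++ "ⓔ"] else S.2.2.2)))
          S)
      (a, b, c, d)
    = (a ++ L.flatMap (pvG V [0, 1, 3, 4, 5] "ⓝ"),
       b ++ L.flatMap (pvG V [3, 5] "ⓣ"),
       c ++ L.flatMap (pvG V [2, 4, 5] "ⓐ"),
       d ++ L.flatMap (pvG V [6] "ⓔ")) := by
  induction L generalizing a b c d with
  | nil => simp
  | cons x L ih =>
    rw [List.foldl_cons]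
    simp only []
    rw [pv_inner]
    rw [ih]
    simp [pvG, List.append_assoc]

-- pick-from-range = guarded flatMap over the (sorted, nonnegative) concrete index list
lemma pv_flatMap_succ {α : Type} (M : Int → List α) (n : Int) (I : List Int) (hI : I.Pairwise (· < ·)) :
    I.flatMap (fun i => if i < n + 1 then M i else [])
      = I.flatMap (fun i => if i < n then M i else []) ++ (if n ∈ I then M n else []) := by
  induction I with
  | nil => simp
  | cons x rest ih =>
    rw [List.pairwise_cons] at hI
    obtain ⟨hx, hrest⟩ := hI
    by_cases hxn : x = n
    · subst hxn
      have h1 : rest.flatMap (fun i => if i < x + 1 then M i else []) = [] := by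
        rw [List.flatMap_eq_nil_iff]; intro y hy; rw [if_neg (by have := hx y hy; omega)]
      have h2 : rest.flatMap (fun i => if i < x then M i else []) = [] := by
        rw [List.flatMap_eq_nil_iff]; intro y hy; rw [if_neg (by have := hx y hy; omega)]
      simp only [List.flatMap_cons, h1, h2]
      rw [if_pos (by omega : x < x + 1), if_neg (lt_irrefl x), if_pos (by simp : x ∈ x :: rest)]
      simp
    · have hiff : (x < n + 1) = (x < n) := by
        by_cases h : x < n <;> simp [h] <;> omega
      have hmem : (n ∈ x :: rest) ↔ (n ∈ rest) := by
        rw [List.mem_cons]; exact or_iff_right (fun h => hxn h.symm)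
      simp only [List.flatMap_cons, hiff, ih hrest, hmem, List.append_assoc]

lemma pv_range_flatMap {α : Type} (M : Int → List α) (I : List Int) (hI : I.Pairwise (· < ·))
    (h0 : ∀ i ∈ I, 0 ≤ i) (n : Nat) :
    (PySem.List.pyRange 0 (n : Int) 1).flatMap (fun i => if i ∈ I then M i else [])
      = I.flatMap (fun i => if i < (n : Int) then M i else []) := by
  induction n with
  | zero =>
    rw [PySem.List.pyRange_one_eq_nil (by norm_num)]
    rw [show (([] : List Int).flatMap (fun i => if i ∈ I then M i else [])) = ([] : List α) from rfl,
        Eq.comm, List.flatMap_eq_nil_iff]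
    intro y hy
    rw [if_neg (by have := h0 y hy; omega)]
  | succ n ih =>
    have hcast : ((n + 1 : Nat) : Int) = (n : Int) + 1 := by push_cast; ring
    rw [hcast, PySem.List.pyRange_one_succ_right (by positivity), List.flatMap_append, ih,
        pv_flatMap_succ M (n : Int) I hI]
    simp

lemma pv_cat_eq (V : List (List String)) (I : List Int) (suf : String)
    (hI : I.Pairwise (· < ·)) (h0 : ∀ i ∈ I, 0 ≤ i) :
    (PySem.List.pyRange 0 (V.length : Int) 1).flatMap (pvG V I suf) = pvCat I suf V := by
  unfold pvCat pvG
  exact pv_range_flatMap _ I hI h0 V.length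

-- ===== VERDICT (by name: the statement is the Claim_ definition above) =====
theorem semplificavincoli_spec : Claim_equal_semplificavincoli := by
  intro V Pr _
  unfold Spec_semplificavincoli semplificavincoli semplificavincoli_alt
  simp only []
  rw [pv_outer]
  rw [pv_cat_eq V _ _ (by decide) (by decide),
      pv_cat_eq V _ _ (by decide) (by decide),
      pv_cat_eq V _ _ (by decide) (by decide),
      pv_cat_eq V _ _ (by decide) (by decide)]
  simp
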